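-- pv_equiv track=rewrite | github.com/mfricke-genevention/universal_mosbi | scripts/join_table.py | find_metadata
-- ===== SOURCE A (Python) =====
-- def find_metadata(metadata, path):
--     metadata_match = {}
--     for matching_metadata in metadata:
--         dataset_pathes = matching_metadata.keys()
--         for dataset_path in dataset_pathes:
--             tmp = dataset_path.split("data/")
--             dataset_id = tmp[-1]
--             if dataset_id in path:
--                 metadata_match = matching_metadata[dataset_path]
--     if not metadata_match:
--         raise ValueError(f"Can't find metadata for file: {path}")
--     return metadata_match
-- ===== SOURCE B (Python) =====
-- def find_metadata(metadata, path):
--     # Early-exit reverse search: first match from the end == A's last match.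
--     result = None
--     for matching_metadata in reversed(metadata):
--         for dataset_path in reversed(list(matching_metadata.keys())):
--             dataset_id = dataset_path.split("data/")[-1]
--             if dataset_id in path:
--                 result = matching_metadata[dataset_path]
--                 break
--         if result is not None:
--             break
--     if not result:
--         raise ValueError(f"Can't find metadata for file: {path}")
--     return result
-- ===== Notes on version B (the rewrite author's own statement) =====
-- stated objective: alternative
-- what changed: Replaces A's full overwrite-through scan (last match wins by overwriting) with an early-exit reverse search: iterate dicts and keys from the end and stop at the first match, which is A's last match.
import Mathlib
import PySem

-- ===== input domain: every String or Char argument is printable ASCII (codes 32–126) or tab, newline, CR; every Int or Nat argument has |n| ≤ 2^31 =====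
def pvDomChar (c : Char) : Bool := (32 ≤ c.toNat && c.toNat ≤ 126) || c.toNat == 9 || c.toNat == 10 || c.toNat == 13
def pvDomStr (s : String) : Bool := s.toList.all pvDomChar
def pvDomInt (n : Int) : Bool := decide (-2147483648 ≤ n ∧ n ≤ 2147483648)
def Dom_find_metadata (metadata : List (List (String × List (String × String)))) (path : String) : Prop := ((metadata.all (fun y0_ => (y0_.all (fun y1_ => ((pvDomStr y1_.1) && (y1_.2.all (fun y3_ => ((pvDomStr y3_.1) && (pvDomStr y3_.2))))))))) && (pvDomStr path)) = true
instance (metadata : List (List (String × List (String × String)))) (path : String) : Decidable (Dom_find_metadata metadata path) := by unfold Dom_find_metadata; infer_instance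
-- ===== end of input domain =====

-- B replaces A's overwrite-through full scan by an early-exit reverse search (alternative traversal, same cost).


-- dataset_path.split("data/")[-1]  (split with a nonempty separator never fails and never returns [])
def pvDsid (dataset_path : String) : String :=
  (PySem.List.pyGet? ((PySem.Str.split? dataset_path "data/").getD []) (-1)).getD ""

-- ===== PORT A =====
-- A: fold over all dicts and all keys, overwriting metadata_match on every hit; `raise` when the
-- final value is falsy (empty) is excluded by Pre_, where the port returns that empty value.
def find_metadata (metadata : List (List (String × List (String × String)))) (path : String) : List (String × String) :=
  metadata.foldl
    (fun metadata_match matching_metadata =>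
      let d := PySem.Dict.ofList matching_metadata
      d.keys.foldl
        (fun acc dataset_path =>
          if PySem.Str.isIn (pvDsid dataset_path) path then d.getD dataset_path [] else acc)
        metadata_match)
    []

-- ===== PORT B =====
-- B: scan the keys of one dict from the end, stopping at the first hit
def pvScanKeys (d : PySem.Dict String (List (String × String))) (keys : List String) (path : String) :
    Option (List (String × String)) :=
  match keys with
  | [] => none
  | dataset_path :: rest =>
      if PySem.Str.isIn (pvDsid dataset_path) path then some (d.getD dataset_path [])
      else pvScanKeys d rest path

-- B: scan the (already reversed) list of dicts, stopping at the first dict with a hit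
def pvScanMeta (mds : List (List (String × List (String × String)))) (path : String) :
    Option (List (String × String)) :=
  match mds with
  | [] => none
  | matching_metadata :: rest =>
      let d := PySem.Dict.ofList matching_metadata
      match pvScanKeys d d.keys.reverse path with
      | some v => some v
      | none => pvScanMeta rest path

-- `raise` when no hit or the found value is falsy is excluded by Pre_; the port returns [] there.
def find_metadata_alt (metadata : List (List (String × List (String × String)))) (path : String) : List (String × String) :=
  (pvScanMeta metadata.reverse path).getD []

-- ===== PRECONDITION & SPEC =====
-- Pre_ excludes exactly the inputs where Python A raises ValueError: no key matches, or the
-- last matching key's value is the empty dict (falsy).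
def pvMatches (metadata : List (List (String × List (String × String)))) (path : String) :
    List (String × List (String × String)) :=
  metadata.flatMap (fun md => (PySem.Dict.ofList md).items.filter (fun kv => PySem.Str.isIn (pvDsid kv.1) path))

def Pre_find_metadata (metadata : List (List (String × List (String × String)))) (path : String) : Prop :=
  pvMatches metadata path ≠ [] ∧ (pvMatches metadata path).getLast?.map (·.2) ≠ some []
instance (metadata : List (List (String × List (String × String)))) (path : String) : Decidable (Pre_find_metadata metadata path) := by unfold Pre_find_metadata; infer_instance

def pvWitness_find_metadata : (List (List (String × List (String × String)))) × String :=
  ([[("data/x", [("a", "b")])]], "x")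

def Spec_find_metadata (metadata : List (List (String × List (String × String)))) (path : String) (out : List (String × String)) : Prop := out = find_metadata_alt metadata path
instance (metadata : List (List (String × List (String × String)))) (path : String) (out : List (String × String)) : Decidable (Spec_find_metadata metadata path out) := by unfold Spec_find_metadata; infer_instance

-- ===== CLAIM (what is proved, stated in full; the proofs are below) =====
def Claim_equal_find_metadata : Prop := ∀ (metadata : List (List (String × List (String × String)))) (path : String), Dom_find_metadata metadata path → Pre_find_metadata metadata path → Spec_find_metadata metadata path (find_metadata metadata path)

-- ===== LEMMAS AND PROOFS =====

-- A's inner overwrite fold equals "last matching key wins", phrased as find? on the reversed keys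
theorem pv_innerA (path : String) (d : PySem.Dict String (List (String × String)))
    (keys : List String) (acc : List (String × String)) :
    keys.foldl
      (fun acc dataset_path =>
        if PySem.Str.isIn (pvDsid dataset_path) path then d.getD dataset_path [] else acc)
      acc
    = ((keys.reverse.find? (fun k => PySem.Str.isIn (pvDsid k) path)).map
        (fun k => d.getD k [])).getD acc := by
  induction keys generalizing acc with
  | nil => rfl
  | cons k ks ih =>
      simp only [List.foldl_cons, List.reverse_cons, List.find?_append, ih]
      cases h : ks.reverse.find? (fun k => PySem.Str.isIn (pvDsid k) path) with
      | some j => simp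
      | none =>
          cases hp : PySem.Chars.isIn (pvDsid k).toList path.toList <;>
            simp [List.find?, hp]

-- A's outer fold equals "last dict with a hit wins", phrased as findSome? on the reversed list
theorem pv_outerA
    (f : List (String × List (String × String)) → Option (List (String × String)))
    (mds : List (List (String × List (String × String)))) (acc : List (String × String)) :
    mds.foldl (fun a md => (f md).getD a) acc
    = (mds.reverse.findSome? f).getD acc := by
  induction mds generalizing acc with
  | nil => rfl
  | cons md rest ih =>
      simp only [List.foldl_cons, List.reverse_cons, List.findSome?_append, ih]
      cases h : rest.reverse.findSome? f with
      | some v => simp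
      | none =>
          simp only [List.findSome?]
          cases hf : f md <;> simp

-- B's inner scan is find?-then-lookup
theorem pv_scanKeys_eq (d : PySem.Dict String (List (String × String)))
    (keys : List String) (path : String) :
    pvScanKeys d keys path
    = (keys.find? (fun k => PySem.Str.isIn (pvDsid k) path)).map (fun k => d.getD k []) := by
  induction keys with
  | nil => rfl
  | cons k ks ih =>
      cases hp : PySem.Chars.isIn (pvDsid k).toList path.toList <;>
        simp [pvScanKeys, List.find?, hp, ih]

-- B's outer scan is findSome?
theorem pv_scanMeta_eq (mds : List (List (String × List (String × String)))) (path : String) :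
    pvScanMeta mds path
    = mds.findSome? (fun md =>
        pvScanKeys (PySem.Dict.ofList md) (PySem.Dict.ofList md).keys.reverse path) := by
  induction mds with
  | nil => rfl
  | cons md rest ih =>
      simp only [pvScanMeta, List.findSome?]
      cases h : pvScanKeys (PySem.Dict.ofList md) (PySem.Dict.ofList md).keys.reverse path <;>
        simp [ih]

theorem pv_eq (metadata : List (List (String × List (String × String)))) (path : String) :
    find_metadata metadata path = find_metadata_alt metadata path := by
  unfold find_metadata find_metadata_alt
  rw [pv_scanMeta_eq]
  have hA := pv_outerA
    (fun md => ((PySem.Dict.ofList md).keys.reverse.find?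
        (fun k => PySem.Str.isIn (pvDsid k) path)).map
        (fun k => (PySem.Dict.ofList md).getD k []))
    metadata []
  simp only [pv_innerA path] at *
  simp only [pv_scanKeys_eq]
  exact hA

-- ===== VERDICT (by name: the statement is the Claim_ definition above) =====
theorem find_metadata_spec : Claim_equal_find_metadata := by
  intro metadata path _ _
  unfold Spec_find_metadata
  exact pv_eq metadata path
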